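-- pv_equiv track=rewrite | github.com/RIOT-OS/murdock-scripts | parse_result.py | bootstrap_list2grid
-- ===== SOURCE A (Python) =====
-- def bootstrap_list2grid(_list, gridsize, firstrow):
--     res = '<div class="row"><div class="col-md-12">' + firstrow + '</div>'
--
--     for n, field in enumerate(_list):
--         if n % gridsize == 0:
--             res += '</div><div class="row">'
--         res += '<div class="col-md-3">' + field + '</div>'
--
--     for n in range(0, (len(_list) + gridsize) % gridsize):
--         res += '<div class="col-md-3"></div>'
--
--     res += '</div>'
--     return res
-- ===== SOURCE B (Python) =====
-- def bootstrap_list2grid(_list, gridsize, firstrow):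
--     parts = ['<div class="row"><div class="col-md-12">' + firstrow + '</div>']
--     for i in range(0, len(_list), gridsize):
--         parts.append('</div><div class="row">')
--         for field in _list[i:i + gridsize]:
--             parts.append('<div class="col-md-3">' + field + '</div>')
--     parts.extend(['<div class="col-md-3"></div>'] * (len(_list) % gridsize))
--     parts.append('</div>')
--     return ''.join(parts)
-- ===== Notes on version B (the rewrite author's own statement) =====
-- stated objective: alternative
-- what changed: Replaces A's flat enumerate loop with a modulo-counter test and string concatenation by an outer loop over row chunks (range with stride gridsize, slicing each row) that collects parts in a list and joins them once.
import Mathlib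
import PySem

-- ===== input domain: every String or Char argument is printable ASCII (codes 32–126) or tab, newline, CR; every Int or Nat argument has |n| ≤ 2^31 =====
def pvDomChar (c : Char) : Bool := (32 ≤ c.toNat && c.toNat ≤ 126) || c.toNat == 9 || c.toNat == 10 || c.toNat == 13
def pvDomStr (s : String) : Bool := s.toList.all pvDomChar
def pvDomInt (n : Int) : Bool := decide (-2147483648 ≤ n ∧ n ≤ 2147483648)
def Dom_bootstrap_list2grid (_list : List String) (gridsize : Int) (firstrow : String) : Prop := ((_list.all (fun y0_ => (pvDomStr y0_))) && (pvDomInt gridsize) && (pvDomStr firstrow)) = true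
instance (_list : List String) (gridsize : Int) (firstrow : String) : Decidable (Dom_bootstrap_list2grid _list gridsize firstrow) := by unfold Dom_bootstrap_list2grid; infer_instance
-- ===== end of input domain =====

-- B builds the grid by an outer loop over row chunks (stride range + slice) collecting parts in a
-- list joined once, instead of A's flat enumerate loop with a modulo test; same value on Pre_.

-- ===== PORT A =====
def bootstrap_list2grid (_list : List String) (gridsize : Int) (firstrow : String) : String :=
  ((PySem.List.pyRange 0 (PySem.Int.mod ((_list.length : Int) + gridsize) gridsize) 1).foldl
      (fun res _ => res ++ "<div class=\"col-md-3\"></div>")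
      ((PySem.List.enumerate _list).foldl
        (fun res nf =>
          (if PySem.Int.mod nf.1 gridsize = 0 then res ++ "</div><div class=\"row\">" else res)
            ++ ("<div class=\"col-md-3\">" ++ nf.2 ++ "</div>"))
        ("<div class=\"row\"><div class=\"col-md-12\">" ++ firstrow ++ "</div>")))
    ++ "</div>"

-- ===== PORT B =====
def bootstrap_list2grid_alt (_list : List String) (gridsize : Int) (firstrow : String) : String :=
  PySem.Str.join ""
    ((((PySem.List.pyRange 0 (_list.length : Int) gridsize).foldl
        (fun parts i =>
          (PySem.List.slice _list (some i) (some (i + gridsize))).foldl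
            (fun parts field => parts ++ ["<div class=\"col-md-3\">" ++ field ++ "</div>"])
            (parts ++ ["</div><div class=\"row\">"]))
        ["<div class=\"row\"><div class=\"col-md-12\">" ++ firstrow ++ "</div>"])
      ++ PySem.List.pyRepeat ["<div class=\"col-md-3\"></div>"] (PySem.Int.mod (_list.length : Int) gridsize))
      ++ ["</div>"])

-- ===== PRECONDITION & SPEC =====
-- Pre_ excludes non-positive gridsize: at gridsize = 0 the Python A raises ZeroDivisionError, and
-- a negative grid size is meaningless — the layout A returns there is an accident of Python's
-- negative floor-modulo which B's stride loop does not reproduce.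
def Pre_bootstrap_list2grid (_list : List String) (gridsize : Int) (firstrow : String) : Prop :=
  1 ≤ gridsize
instance (_list : List String) (gridsize : Int) (firstrow : String) : Decidable (Pre_bootstrap_list2grid _list gridsize firstrow) := by unfold Pre_bootstrap_list2grid; infer_instance
def pvWitness_bootstrap_list2grid : List String × Int × String := (["a", "b", "c"], 2, "h")
def Spec_bootstrap_list2grid (_list : List String) (gridsize : Int) (firstrow : String) (out : String) : Prop := out = bootstrap_list2grid_alt _list gridsize firstrow
instance (_list : List String) (gridsize : Int) (firstrow : String) (out : String) : Decidable (Spec_bootstrap_list2grid _list gridsize firstrow out) := by unfold Spec_bootstrap_list2grid; infer_instance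

-- ===== CLAIM (what is proved, stated in full; the proofs are below) =====
def Claim_equal_bootstrap_list2grid : Prop := ∀ (_list : List String) (gridsize : Int) (firstrow : String), Dom_bootstrap_list2grid _list gridsize firstrow → Pre_bootstrap_list2grid _list gridsize firstrow → Spec_bootstrap_list2grid _list gridsize firstrow (bootstrap_list2grid _list gridsize firstrow)

-- ===== LEMMAS AND PROOFS =====

/-- One grid cell, the string both programs emit per field. -/
def cellStr (f : String) : String := "<div class=\"col-md-3\">" ++ f ++ "</div>"

/-- The field list split into rows of `g` fields (last row may be shorter). -/
def chunksOf (g : Nat) : List String → List (List String)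
  | [] => []
  | f :: rest => (f :: rest.take (g - 1)) :: chunksOf g (rest.drop (g - 1))
  termination_by L => L.length
  decreasing_by simp

/-- The row-break/cell strings both programs emit for the whole field list. -/
def rowParts (g : Nat) (L : List String) : List String :=
  ((chunksOf g L).map (fun ch => "</div><div class=\"row\">" :: ch.map cellStr)).flatten

theorem rowParts_nil (g : Nat) : rowParts g [] = [] := by
  rw [rowParts, chunksOf]; simp

theorem rowParts_cons (g : Nat) (f : String) (rest : List String) :
    rowParts g (f :: rest)
      = ("</div><div class=\"row\">" :: (f :: rest.take (g - 1)).map cellStr)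
        ++ rowParts g (rest.drop (g - 1)) := by
  rw [rowParts, chunksOf]; simp [rowParts]

/-- A's loop on indices that are not multiples of `gridsize` appends one cell per field. -/
theorem A_cells (gridsize : Int) :
    ∀ (xs : List String) (s : Int) (acc : String),
      (∀ k : Nat, k < xs.length → PySem.Int.mod (s + k) gridsize ≠ 0) →
      (PySem.List.enumerate xs s).foldl
        (fun res nf =>
          (if PySem.Int.mod nf.1 gridsize = 0 then res ++ "</div><div class=\"row\">" else res)
            ++ ("<div class=\"col-md-3\">" ++ nf.2 ++ "</div>")) acc
      = acc ++ String.join (xs.map cellStr) := by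
  intro xs
  induction xs with
  | nil =>
    intro s acc h
    apply String.toList_inj.mp
    simp [PySem.List.enumerate_nil, String.toList_append]
  | cons x xs ih =>
    intro s acc h
    rw [PySem.List.enumerate_cons, List.foldl_cons]
    have h0 : ¬ PySem.Int.mod (s + ((0:Nat):Int)) gridsize = 0 := h 0 (by simp)
    simp only [Nat.cast_zero, add_zero] at h0
    show (PySem.List.enumerate xs (s+1)).foldl _
        ((if PySem.Int.mod s gridsize = 0 then acc ++ "</div><div class=\"row\">" else acc)
          ++ ("<div class=\"col-md-3\">" ++ x ++ "</div>")) = _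
    rw [if_neg h0]
    rw [ih (s+1) _ (by
      intro k hk
      have h' := h (k+1) (by simpa using Nat.succ_lt_succ hk)
      push_cast at h' ⊢
      have e : s + 1 + (k:Int) = s + ((k:Int)+1) := by ring
      rw [e]; exact h')]
    apply String.toList_inj.mp
    simp [String.toList_append, String.toList_join, cellStr]

/-- A's whole enumerate loop, started at a multiple of `gridsize`, emits `rowParts`. -/
theorem A_loop (gridsize : Int) (hg : 1 ≤ gridsize) :
    ∀ (k : Nat) (L : List String) (c : Nat) (acc : String), L.length ≤ k →
      (PySem.List.enumerate L ((c : Int) * gridsize)).foldl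
        (fun res nf =>
          (if PySem.Int.mod nf.1 gridsize = 0 then res ++ "</div><div class=\"row\">" else res)
            ++ ("<div class=\"col-md-3\">" ++ nf.2 ++ "</div>")) acc
      = acc ++ String.join (rowParts gridsize.toNat L) := by
  intro k
  induction k with
  | zero =>
    intro L c acc hlen
    have : L = [] := List.eq_nil_of_length_eq_zero (by omega)
    subst this
    apply String.toList_inj.mp
    simp [PySem.List.enumerate_nil, rowParts_nil, String.toList_append]
  | succ k ih =>
    intro L c acc hlen
    cases L with
    | nil =>
      apply String.toList_inj.mp
      simp [PySem.List.enumerate_nil, rowParts_nil, String.toList_append]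
    | cons f rest =>
      have hrest : rest.length ≤ k := by simpa using hlen
      have hgn : ((gridsize.toNat : Nat) : Int) = gridsize := Int.toNat_of_nonneg (by omega)
      rw [PySem.List.enumerate_cons, List.foldl_cons]
      have h0 : PySem.Int.mod ((c:Int) * gridsize) gridsize = 0 := by
        rw [PySem.Int.mod_eq_emod_of_pos (by omega)]
        exact Int.mul_emod_left _ _
      show (PySem.List.enumerate rest ((c:Int) * gridsize + 1)).foldl _
          ((if PySem.Int.mod ((c:Int) * gridsize) gridsize = 0 then acc ++ "</div><div class=\"row\">" else acc)
            ++ ("<div class=\"col-md-3\">" ++ f ++ "</div>")) = _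
      rw [if_pos h0]
      conv_lhs => rw [← List.take_append_drop (gridsize.toNat - 1) rest,
        PySem.List.enumerate_append, List.foldl_append]
      rw [A_cells gridsize (rest.take (gridsize.toNat - 1)) _ _ (by
        intro j hj
        rw [PySem.Int.mod_eq_emod_of_pos (by omega)]
        have hj' : j < gridsize.toNat - 1 := by
          have h := List.length_take (i := gridsize.toNat - 1) (l := rest)
          omega
        have e : (c:Int) * gridsize + 1 + (j:Int) = (1 + (j:Int)) + (c:Int) * gridsize := by ring
        rw [e, Int.add_mul_emod_self_right, Int.emod_eq_of_lt (by omega) (by omega)]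
        omega)]
      by_cases hsmall : rest.length ≤ gridsize.toNat - 1
      · rw [List.drop_eq_nil_of_le hsmall, PySem.List.enumerate_nil, List.foldl_nil,
          List.take_of_length_le hsmall]
        rw [rowParts_cons, List.take_of_length_le hsmall, List.drop_eq_nil_of_le hsmall, rowParts_nil]
        apply String.toList_inj.mp
        simp [String.toList_append, String.toList_join, cellStr]
      · have hlentake : (rest.take (gridsize.toNat - 1)).length = gridsize.toNat - 1 := by
          rw [List.length_take]; omega
        rw [hlentake]
        have estart : (c:Int) * gridsize + 1 + ((gridsize.toNat - 1 : Nat) : Int)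
            = ((c + 1 : Nat) : Int) * gridsize := by
          push_cast [Nat.cast_sub (by omega : 1 ≤ gridsize.toNat)]
          rw [hgn]; ring
        rw [estart, ih (rest.drop (gridsize.toNat - 1)) (c+1) _ (by
          have h := List.length_drop (i := gridsize.toNat - 1) (l := rest); omega)]
        rw [rowParts_cons]
        apply String.toList_inj.mp
        simp [String.toList_append, String.toList_join, cellStr]

theorem pyRange_nil_of_le (a b s : Int) (hs : 0 < s) (hab : b ≤ a) :
    PySem.List.pyRange a b s = [] := by
  rw [PySem.List.pyRange_of_pos _ _ hs]
  simp [not_lt.mpr hab]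

theorem pyRange_cons_of_pos (a b s : Int) (hs : 0 < s) (hab : a < b) :
    PySem.List.pyRange a b s = a :: PySem.List.pyRange (a + s) b s := by
  rw [PySem.List.pyRange_of_pos _ _ hs, PySem.List.pyRange_of_pos _ _ hs]
  have hx : (0:Int) ≤ b - a - 1 := by omega
  have h1 : b - a + s - 1 = (b - a - 1) + 1 * s := by ring
  have h2 : (b - a + s - 1) / s = (b - a - 1) / s + 1 := by
    rw [h1, Int.add_mul_ediv_right _ _ (by omega)]
  have h3 : b - (a + s) + s - 1 = b - a - 1 := by ring
  have hq : (0:Int) ≤ (b - a - 1) / s := Int.ediv_nonneg hx (by omega)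
  have hcnt : (if a + s < b then ((b - (a+s) + s - 1) / s).toNat else 0) = ((b - a - 1) / s).toNat := by
    by_cases hlt : a + s < b
    · rw [if_pos hlt, h3]
    · have hz : (b - a - 1) / s = 0 := Int.ediv_eq_zero_of_lt hx (by omega)
      rw [if_neg hlt, hz]; simp
  rw [if_pos hab, hcnt, h2]
  have : ((b - a - 1) / s + 1).toNat = ((b - a - 1) / s).toNat + 1 := by omega
  rw [this, List.range_succ_eq_map]
  simp only [List.map_cons, List.map_map, Nat.cast_zero]
  refine congrArg₂ List.cons (by ring) ?_
  apply List.map_congr_left; intro k _; simp only [Function.comp_apply]; push_cast; ring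

/-- B's inner loop over one slice appends one cell part per field. -/
theorem B_inner :
    ∀ (xs : List String) (p : List String),
      xs.foldl (fun parts field => parts ++ ["<div class=\"col-md-3\">" ++ field ++ "</div>"]) p
        = p ++ xs.map cellStr := by
  intro xs
  induction xs with
  | nil => intro p; simp
  | cons x xs ih => intro p; simp [ih, cellStr]

/-- B's stride loop from chunk `c` onward appends exactly `rowParts` of the remaining suffix. -/
theorem B_loop (L : List String) (gridsize : Int) (hg : 1 ≤ gridsize) :
    ∀ (k c : Nat) (p : List String), L.length ≤ c * gridsize.toNat + k →
      (PySem.List.pyRange ((c : Int) * gridsize) (L.length : Int) gridsize).foldl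
          (fun parts i =>
            (PySem.List.slice L (some i) (some (i + gridsize))).foldl
              (fun parts field => parts ++ ["<div class=\"col-md-3\">" ++ field ++ "</div>"])
              (parts ++ ["</div><div class=\"row\">"])) p
        = p ++ rowParts gridsize.toNat (L.drop (c * gridsize.toNat)) := by
  have hgn : ((gridsize.toNat : Nat) : Int) = gridsize := Int.toNat_of_nonneg (by omega)
  intro k
  induction k with
  | zero =>
    intro c p hlen
    rw [pyRange_nil_of_le _ _ _ (by omega) (by rw [← hgn]; omega), List.foldl_nil]
    rw [List.drop_eq_nil_of_le (by omega), rowParts_nil, List.append_nil]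
  | succ k ih =>
    intro c p hlen
    by_cases hdone : L.length ≤ c * gridsize.toNat
    · rw [pyRange_nil_of_le _ _ _ (by omega) (by rw [← hgn]; omega), List.foldl_nil]
      rw [List.drop_eq_nil_of_le (by omega), rowParts_nil, List.append_nil]
    · have hlt : c * gridsize.toNat < L.length := by omega
      rw [pyRange_cons_of_pos _ _ _ (by omega) (by rw [← hgn]; omega), List.foldl_cons]
      have hslice : PySem.List.slice L (some ((c:Int) * gridsize)) (some ((c:Int) * gridsize + gridsize))
          = (L.drop (c * gridsize.toNat)).take gridsize.toNat := by
        have e1 : (c:Int) * gridsize = ((c * gridsize.toNat : Nat) : Int) := by push_cast [hgn]; ring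
        have e2 : ((c * gridsize.toNat : Nat) : Int) + gridsize
            = ((c * gridsize.toNat : Nat) : Int) + ((gridsize.toNat : Nat) : Int) := by
          rw [hgn]
        rw [e1, e2, PySem.List.slice_natCast_add]
      obtain ⟨f, rest, hfr⟩ : ∃ f rest, L.drop (c * gridsize.toNat) = f :: rest := by
        cases h : L.drop (c * gridsize.toNat) with
        | nil =>
          have := List.length_drop (i := c * gridsize.toNat) (l := L)
          rw [h] at this; simp at this; omega
        | cons f rest => exact ⟨f, rest, rfl⟩
      have htake : (L.drop (c * gridsize.toNat)).take gridsize.toNat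
          = f :: rest.take (gridsize.toNat - 1) := by
        rw [hfr]
        have : gridsize.toNat = (gridsize.toNat - 1) + 1 := by omega
        rw [this, List.take_succ_cons]
        simp
      rw [hslice, htake, B_inner]
      have estep : (c:Int) * gridsize + gridsize = ((c + 1 : Nat) : Int) * gridsize := by
        push_cast; ring
      rw [estep, ih (c+1) _ (by
        have e : (c+1) * gridsize.toNat = c * gridsize.toNat + gridsize.toNat := by ring
        have hg1 : 1 ≤ gridsize.toNat := by omega
        omega)]
      have hdropdrop : L.drop ((c+1) * gridsize.toNat)
          = rest.drop (gridsize.toNat - 1) := by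
        have e : (c+1) * gridsize.toNat = c * gridsize.toNat + gridsize.toNat := by ring
        rw [e, ← List.drop_drop, hfr]
        have : gridsize.toNat = (gridsize.toNat - 1) + 1 := by omega
        rw [this, List.drop_succ_cons]
        simp
      rw [hdropdrop, hfr, rowParts_cons]
      simp

theorem join_empty_sep (ps : List (List Char)) : PySem.Chars.join [] ps = ps.flatten := by
  induction ps with
  | nil => simp [PySem.Chars.join_nil]
  | cons p rest ih =>
    cases rest with
    | nil => simp [PySem.Chars.join_singleton]
    | cons q rest' =>
      rw [PySem.Chars.join_cons_cons]
      simp_all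

/-- A's padding loop appends one empty cell per range element. -/
theorem A_pad (e : String) :
    ∀ (l : List Int) (acc : String),
      l.foldl (fun res _ => res ++ e) acc = acc ++ String.join (List.replicate l.length e) := by
  intro l
  induction l with
  | nil => intro acc; apply String.toList_inj.mp; simp [String.toList_append]
  | cons x xs ih =>
    intro acc
    rw [List.foldl_cons, ih]
    apply String.toList_inj.mp
    simp [String.toList_append, String.toList_join, List.replicate_succ]

theorem ports_agree (_list : List String) (gridsize : Int) (firstrow : String)
    (hPre : 1 ≤ gridsize) :
    bootstrap_list2grid _list gridsize firstrow = bootstrap_list2grid_alt _list gridsize firstrow := by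
  rw [bootstrap_list2grid, bootstrap_list2grid_alt]
  have hA := A_loop gridsize hPre _list.length _list 0
    ("<div class=\"row\"><div class=\"col-md-12\">" ++ firstrow ++ "</div>") le_rfl
  simp only [Nat.cast_zero, zero_mul] at hA
  rw [hA, A_pad]
  have hB := B_loop _list gridsize hPre _list.length 0
    ["<div class=\"row\"><div class=\"col-md-12\">" ++ firstrow ++ "</div>"] (by simp)
  simp only [Nat.cast_zero, zero_mul, List.drop_zero] at hB
  rw [hB]
  have hmod : PySem.Int.mod ((_list.length:Int) + gridsize) gridsize
      = PySem.Int.mod (_list.length:Int) gridsize := by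
    rw [PySem.Int.mod_eq_emod_of_pos (by omega), PySem.Int.mod_eq_emod_of_pos (by omega),
      Int.add_emod_right]
  rw [hmod]
  apply String.toList_inj.mp
  simp [String.toList_append, String.toList_join, PySem.Str.toList_join, join_empty_sep,
    PySem.List.pyRepeat_singleton, List.map_replicate, PySem.List.length_pyRange_one]

-- ===== VERDICT (by name: the statement is the Claim_ definition above) =====
theorem bootstrap_list2grid_spec : Claim_equal_bootstrap_list2grid := by
  intro _list gridsize firstrow _ hPre
  exact ports_agree _list gridsize firstrow hPre
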